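-- pv_equiv track=rewrite | github.com/NavinShrinivas/UE20CS30X-Submissions | CRYPTO/SUBMISSION-1/2.py | diffplace
-- ===== SOURCE A (Python) =====
-- def diffplace(key_mat, letter_1, letter_2):
--     row1 = 0
--     col1 = 0
--     row2 = 0
--     col2 = 0
--     for i in range(0,len(key_mat)):
--         for j in range(0,len(key_mat[i])):
--             if key_mat[i][j] == letter_1 :
--                 row1 = i
--                 col1 = j
--     for i in range(0,len(key_mat)):
--         for j in range(0,len(key_mat[i])):
--             if key_mat[i][j] == letter_2 :
--                 row2 = i
--                 col2 = j
--     return True, row1, col1, row2, col2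
-- ===== SOURCE B (Python) =====
-- def diffplace(key_mat, letter_1, letter_2):
--     pos = {}
--     for i, row in enumerate(key_mat):
--         for j, cell in enumerate(row):
--             pos[cell] = (i, j)
--     row1, col1 = pos.get(letter_1, (0, 0))
--     row2, col2 = pos.get(letter_2, (0, 0))
--     return True, row1, col1, row2, col2
-- ===== Notes on version B (the rewrite author's own statement) =====
-- stated objective: simpler
-- what changed: Replaces two full nested scans (one per letter) with a single pass that builds a letter->(row,col) index dict (overwrite = last occurrence wins), followed by two constant-time lookups with default (0,0).
import Mathlib
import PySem

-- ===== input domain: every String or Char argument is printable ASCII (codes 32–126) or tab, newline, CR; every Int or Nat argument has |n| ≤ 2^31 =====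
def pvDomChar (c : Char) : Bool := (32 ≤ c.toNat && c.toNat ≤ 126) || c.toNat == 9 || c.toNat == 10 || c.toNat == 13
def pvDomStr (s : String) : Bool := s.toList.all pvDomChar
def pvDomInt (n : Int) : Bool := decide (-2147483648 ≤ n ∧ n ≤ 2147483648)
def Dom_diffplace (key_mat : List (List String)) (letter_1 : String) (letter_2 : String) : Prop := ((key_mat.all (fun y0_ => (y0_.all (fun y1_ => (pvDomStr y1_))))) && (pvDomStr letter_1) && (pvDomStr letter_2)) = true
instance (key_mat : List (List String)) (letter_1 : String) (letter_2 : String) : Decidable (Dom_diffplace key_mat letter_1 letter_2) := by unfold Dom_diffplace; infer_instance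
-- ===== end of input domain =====

-- B builds a letter → (row, col) index dict in one pass and does two lookups; A scans the whole matrix once per letter.

-- ===== PORT A =====
-- A: two index loops 'for i in range(0, len(key_mat)): for j in range(0, len(key_mat[i])): if key_mat[i][j] == letter: ...'
def diffplace (key_mat : List (List String)) (letter_1 : String) (letter_2 : String) : Bool × Int × Int × Int × Int :=
  let p1 : Int × Int :=
    (PySem.List.pyRange 0 key_mat.length 1).foldl (fun st i =>
      (PySem.List.pyRange 0 (PySem.List.pyGetD key_mat i []).length 1).foldl (fun st j =>
        if PySem.List.pyGetD (PySem.List.pyGetD key_mat i []) j "" = letter_1 then (i, j) else st) st) (0, 0)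
  let p2 : Int × Int :=
    (PySem.List.pyRange 0 key_mat.length 1).foldl (fun st i =>
      (PySem.List.pyRange 0 (PySem.List.pyGetD key_mat i []).length 1).foldl (fun st j =>
        if PySem.List.pyGetD (PySem.List.pyGetD key_mat i []) j "" = letter_2 then (i, j) else st) st) (0, 0)
  (true, p1.1, p1.2, p2.1, p2.2)

-- ===== PORT B =====
def diffplace_alt (key_mat : List (List String)) (letter_1 : String) (letter_2 : String) : Bool × Int × Int × Int × Int :=
  let pos : PySem.Dict String (Int × Int) :=
    (PySem.List.enumerate key_mat 0).foldl (fun d p =>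
      (PySem.List.enumerate p.2 0).foldl (fun d q => d.insert q.2 (p.1, q.1)) d) PySem.Dict.empty
  let p1 := pos.getD letter_1 (0, 0)
  let p2 := pos.getD letter_2 (0, 0)
  (true, p1.1, p1.2, p2.1, p2.2)

-- ===== PRECONDITION & SPEC =====
def Spec_diffplace (key_mat : List (List String)) (letter_1 : String) (letter_2 : String) (out : Bool × Int × Int × Int × Int) : Prop := out = diffplace_alt key_mat letter_1 letter_2
instance (key_mat : List (List String)) (letter_1 : String) (letter_2 : String) (out : Bool × Int × Int × Int × Int) : Decidable (Spec_diffplace key_mat letter_1 letter_2 out) := by unfold Spec_diffplace; infer_instance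

-- ===== CLAIM (what is proved, stated in full; the proofs are below) =====
def Claim_equal_diffplace : Prop := ∀ (key_mat : List (List String)) (letter_1 : String) (letter_2 : String), Dom_diffplace key_mat letter_1 letter_2 → Spec_diffplace key_mat letter_1 letter_2 (diffplace key_mat letter_1 letter_2)

-- ===== LEMMAS AND PROOFS =====

-- index loop 'for i in range(0, len(xs)): … i … xs[i] …' is a fold over enumerate
theorem foldl_pyRange_idx_enum {α β : Type} (xs : List α) (dflt : α) (g : β → Int → α → β) :
    ∀ (pre : List α) (init : β),
      (PySem.List.pyRange pre.length (pre.length + xs.length) 1).foldl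
          (fun acc i => g acc i (PySem.List.pyGetD (pre ++ xs) i dflt)) init
        = (PySem.List.enumerate xs (pre.length : Int)).foldl (fun acc p => g acc p.1 p.2) init := by
  induction xs with
  | nil =>
    intro pre init
    simp [PySem.List.pyRange_one_eq_nil]
  | cons x xs ih =>
    intro pre init
    rw [PySem.List.pyRange_one_cons (by simp)]
    simp only [List.foldl_cons, PySem.List.enumerate_cons]
    have hget : PySem.List.pyGetD (pre ++ x :: xs) (pre.length : Int) dflt = x := by
      rw [PySem.List.pyGetD_natCast]
      simp
    rw [hget]
    have := ih (pre ++ [x]) (g init (pre.length : Int) x)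
    simp only [List.length_append, List.length_cons] at this ⊢
    have harr : ((pre.length : Int) + 1 : Int) = ((pre.length + 1 : Nat) : Int) := by push_cast; ring
    rw [show (pre.length : Int) + ((xs.length : Nat) + 1 : Nat) = ((pre.length + 1 : Nat) : Int) + (xs.length : Nat) by push_cast; ring]
    rw [harr]
    have hx : pre ++ x :: xs = (pre ++ [x]) ++ xs := by simp
    rw [hx]
    exact this

-- the inner row loop: dict lookup after the inserts = A's conditional update fold
theorem inner_dict (l : String) (i : Int) :
    ∀ (qs : List (Int × String)) (d : PySem.Dict String (Int × Int)),
      (qs.foldl (fun d q => d.insert q.2 (i, q.1)) d).getD l (0, 0)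
        = qs.foldl (fun st q => if q.2 = l then (i, q.1) else st) (d.getD l (0, 0)) := by
  intro qs
  induction qs with
  | nil => intro d; rfl
  | cons q qs ih =>
    intro d
    simp only [List.foldl_cons, ih, PySem.Dict.getD_insert]
    rcases eq_or_ne l q.2 with h | h
    · simp [h]
    · simp [h, Ne.symm h]

-- the outer loop: dict lookup after the whole build = A's scan for letter l
theorem outer_dict (l : String) :
    ∀ (ps : List (Int × List String)) (d : PySem.Dict String (Int × Int)),
      ((ps.foldl (fun d p => (PySem.List.enumerate p.2 0).foldl (fun d q => d.insert q.2 (p.1, q.1)) d) d).getD l (0, 0))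
        = ps.foldl (fun st p => (PySem.List.enumerate p.2 0).foldl (fun st q => if q.2 = l then (p.1, q.1) else st) st) (d.getD l (0, 0)) := by
  intro ps
  induction ps with
  | nil => intro d; rfl
  | cons p ps ih =>
    intro d
    simp only [List.foldl_cons, ih, inner_dict]

-- A's scan for one letter, rewritten through enumerate, equals B's dict lookup
theorem scan_eq_lookup (key_mat : List (List String)) (l : String) :
    ((PySem.List.pyRange 0 key_mat.length 1).foldl (fun st i =>
        (PySem.List.pyRange 0 (PySem.List.pyGetD key_mat i []).length 1).foldl (fun st j =>
          if PySem.List.pyGetD (PySem.List.pyGetD key_mat i []) j "" = l then (i, j) else st) st) ((0 : Int), (0 : Int)))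
      = ((PySem.List.enumerate key_mat 0).foldl (fun d p =>
          (PySem.List.enumerate p.2 0).foldl (fun d q => d.insert q.2 (p.1, q.1)) d)
          (PySem.Dict.empty : PySem.Dict String (Int × Int))).getD l (0, 0) := by
  rw [outer_dict]
  simp only [PySem.Dict.getD_empty]
  have houter := foldl_pyRange_idx_enum key_mat []
      (fun (st : Int × Int) (i : Int) (row : List String) =>
        (PySem.List.pyRange 0 row.length 1).foldl (fun st j =>
          if PySem.List.pyGetD row j "" = l then (i, j) else st) st) [] ((0 : Int), (0 : Int))
  simp only [List.nil_append, List.length_nil, Nat.cast_zero, Int.zero_add] at houter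
  refine houter.trans ?_
  refine PySem.List.foldl_congr_mem _ _ _ _ ?_
  intro st p _
  have hinner := foldl_pyRange_idx_enum p.2 ""
      (fun (st : Int × Int) (j : Int) (c : String) => if c = l then (p.1, j) else st) [] st
  simp only [List.nil_append, List.length_nil, Nat.cast_zero, Int.zero_add] at hinner
  exact hinner

-- ===== VERDICT (by name: the statement is the Claim_ definition above) =====
theorem diffplace_spec : Claim_equal_diffplace := by
  intro key_mat letter_1 letter_2 _
  unfold Spec_diffplace diffplace diffplace_alt
  simp only [scan_eq_lookup]
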